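-- pv_equiv track=rewrite | github.com/davide-leone/cdmo-mcp | modules/utils.py | get_tours_and_loads
-- ===== SOURCE A (Python) =====
-- def get_tours_and_loads(predecessor, assigned_courier, loads_int, m, n):
--     '''
--     Extracts the tour taken by each courier as a sequence of distribution points visited,
--     based on their assigned loads and predecessors
--
--     '''
--     visited_dp = [[] for x in range(1, m+1)]         # Distribution points visited by each courier
--     loads_int_courier = [[] for x in range(1, m+1)]  # Intermediate load of each courier
--     tours = [[0] for x in range(1, m+1)]
--     loads = []
--     solution = []
--
--     # Populate visited_dp and loads_int_courier with predecessors and loads for each courier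
--     for courier in range(m):
--         for node in range(len(assigned_courier)):
--             if assigned_courier[node] == courier+1 and loads_int[node] != 0 and predecessor[node] < n+1:
--                 visited_dp[courier].append(predecessor[node]-1)
--                 loads_int_courier[courier].append(loads_int[node])
--
--     # Sort and format tours, and calculate the final load
--     for courier in range(m):
--         pairs = zip(visited_dp[courier], loads_int_courier[courier])
--         pairs = sorted(pairs, key = lambda x: x[1])
--         tours[courier] = [p[0]+1 for p in pairs]
--         tours[courier].append(n+1)
--         tours[courier].insert(0, n+1)
--         if loads_int_courier[courier]:
--             loads.append(max(loads_int_courier[courier]))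
--         else:
--             loads.append(0)
--
--     # Prepare the solution without origin
--     for t in tours:
--         solution.append(t[1:-1])
--
--     return loads, tours, solution
-- ===== SOURCE B (Python) =====
-- def get_tours_and_loads(predecessor, assigned_courier, loads_int, m, n):
--     # Single pass over the nodes, bucketing each node into its courier's pair list,
--     # instead of rescanning all nodes once per courier.
--     buckets = [[] for _ in range(m)]
--     for node, c in enumerate(assigned_courier):
--         if 1 <= c <= m and loads_int[node] != 0 and predecessor[node] < n + 1:
--             buckets[c - 1].append((predecessor[node] - 1, loads_int[node]))
--     loads, tours, solution = [], [], []
--     for pairs in buckets: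
--         pairs = sorted(pairs, key=lambda p: p[1])
--         inner = [p + 1 for p, _ in pairs]
--         loads.append(max((l for _, l in pairs), default=0))
--         tours.append([n + 1] + inner + [n + 1])
--         solution.append(inner)
--     return loads, tours, solution
-- ===== Notes on version B (the rewrite author's own statement) =====
-- stated objective: faster
-- what changed: Replaces the m-by-n double scan (one full pass over all nodes per courier) with a single pass over the nodes that buckets each node's (predecessor, load) pair into its courier's list, then formats each bucket.
import Mathlib
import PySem

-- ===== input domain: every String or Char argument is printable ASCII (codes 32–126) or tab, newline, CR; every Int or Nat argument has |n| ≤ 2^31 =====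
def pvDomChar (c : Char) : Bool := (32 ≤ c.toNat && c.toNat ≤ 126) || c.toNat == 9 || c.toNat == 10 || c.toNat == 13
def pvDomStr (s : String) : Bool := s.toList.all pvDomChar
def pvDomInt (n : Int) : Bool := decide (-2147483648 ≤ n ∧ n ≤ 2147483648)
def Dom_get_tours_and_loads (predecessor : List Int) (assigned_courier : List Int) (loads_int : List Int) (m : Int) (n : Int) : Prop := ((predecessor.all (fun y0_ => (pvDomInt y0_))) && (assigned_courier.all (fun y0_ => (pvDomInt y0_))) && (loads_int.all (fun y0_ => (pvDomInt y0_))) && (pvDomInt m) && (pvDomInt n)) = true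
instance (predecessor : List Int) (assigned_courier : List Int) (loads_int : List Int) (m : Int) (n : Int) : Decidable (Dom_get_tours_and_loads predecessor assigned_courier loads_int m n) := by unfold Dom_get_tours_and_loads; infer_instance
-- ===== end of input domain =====

-- B replaces A's m×n double scan by a single bucketing pass over the nodes (objective: faster, asymptotic).

-- ===== PORT A =====
def get_tours_and_loads (predecessor : List Int) (assigned_courier : List Int) (loads_int : List Int) (m : Int) (n : Int) : List Int × List (List Int) × List (List Int) :=
  let visited0 : List (List Int) := (PySem.List.pyRange 1 (m + 1) 1).map (fun _ => ([] : List Int))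
  let loadsc0 : List (List Int) := (PySem.List.pyRange 1 (m + 1) 1).map (fun _ => ([] : List Int))
  let tours0 : List (List Int) := (PySem.List.pyRange 1 (m + 1) 1).map (fun _ => ([0] : List Int))
  let st1 := (PySem.List.pyRange 0 m 1).foldl (fun (st : List (List Int) × List (List Int)) courier =>
      (PySem.List.pyRange 0 (assigned_courier.length : Int) 1).foldl (fun (st2 : List (List Int) × List (List Int)) node =>
        if PySem.List.pyGetD assigned_courier node 0 = courier + 1 ∧
           PySem.List.pyGetD loads_int node 0 ≠ 0 ∧
           PySem.List.pyGetD predecessor node 0 < n + 1 then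
          (PySem.List.pySetD st2.1 courier (PySem.List.pyGetD st2.1 courier [] ++ [PySem.List.pyGetD predecessor node 0 - 1]),
           PySem.List.pySetD st2.2 courier (PySem.List.pyGetD st2.2 courier [] ++ [PySem.List.pyGetD loads_int node 0]))
        else st2) st) (visited0, loadsc0)
  let st2 := (PySem.List.pyRange 0 m 1).foldl (fun (st : List (List Int) × List Int) courier =>
      let pairs := (PySem.List.pyGetD st1.1 courier []).zip (PySem.List.pyGetD st1.2 courier [])
      let pairs := PySem.List.sorted pairs (fun x => x.2) false
      let tc := pairs.map (fun p => p.1 + 1)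
      let tc := tc ++ [n + 1]
      let tc := PySem.List.insert tc 0 (n + 1)
      let ld := match PySem.List.max? (PySem.List.pyGetD st1.2 courier []) (fun y => y) with
                | some v => v
                | none => 0
      (PySem.List.pySetD st.1 courier tc, st.2 ++ [ld])) (tours0, ([] : List Int))
  let solution := st2.1.foldl (fun (acc : List (List Int)) t => acc ++ [PySem.List.slice t (some 1) (some (-1))]) []
  (st2.2, st2.1, solution)

-- ===== PORT B =====
def get_tours_and_loads_alt (predecessor : List Int) (assigned_courier : List Int) (loads_int : List Int) (m : Int) (n : Int) : List Int × List (List Int) × List (List Int) :=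
  let buckets0 : List (List (Int × Int)) := (PySem.List.pyRange 0 m 1).map (fun _ => ([] : List (Int × Int)))
  let buckets := (PySem.List.enumerate assigned_courier 0).foldl (fun (bs : List (List (Int × Int))) nc =>
      if 1 ≤ nc.2 ∧ nc.2 ≤ m ∧ PySem.List.pyGetD loads_int nc.1 0 ≠ 0 ∧ PySem.List.pyGetD predecessor nc.1 0 < n + 1 then
        PySem.List.pySetD bs (nc.2 - 1) (PySem.List.pyGetD bs (nc.2 - 1) [] ++
          [(PySem.List.pyGetD predecessor nc.1 0 - 1, PySem.List.pyGetD loads_int nc.1 0)])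
      else bs) buckets0
  buckets.foldl (fun (st : List Int × List (List Int) × List (List Int)) pairs0 =>
      let pairs := PySem.List.sorted pairs0 (fun p => p.2) false
      let inner := pairs.map (fun p => p.1 + 1)
      let ld := match PySem.List.max? (pairs.map (fun p => p.2)) (fun y => y) with
                | some v => v
                | none => 0
      (st.1 ++ [ld], st.2.1 ++ [(n + 1) :: (inner ++ [n + 1])], st.2.2 ++ [inner]))
    (([] : List Int), ([] : List (List Int)), ([] : List (List Int)))

-- ===== PRECONDITION & SPEC =====
-- Pre_ excludes exactly the inputs where Python A raises IndexError: a node whose assigned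
-- courier lies in 1..m must have an entry in loads_int, and (if that load is nonzero) in predecessor.
def Pre_get_tours_and_loads (predecessor : List Int) (assigned_courier : List Int) (loads_int : List Int) (m : Int) (n : Int) : Prop :=
  ∀ k : Nat, (hk : k < assigned_courier.length) → 1 ≤ assigned_courier[k] → assigned_courier[k] ≤ m →
    k < loads_int.length ∧ (loads_int.getD k 0 ≠ 0 → k < predecessor.length)
instance (predecessor : List Int) (assigned_courier : List Int) (loads_int : List Int) (m : Int) (n : Int) : Decidable (Pre_get_tours_and_loads predecessor assigned_courier loads_int m n) := by unfold Pre_get_tours_and_loads; infer_instance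
def pvWitness_get_tours_and_loads : List Int × List Int × List Int × Int × Int := ([2, 3], [1, 2], [5, 6], 2, 2)

def Spec_get_tours_and_loads (predecessor : List Int) (assigned_courier : List Int) (loads_int : List Int) (m : Int) (n : Int) (out : List Int × List (List Int) × List (List Int)) : Prop := out = get_tours_and_loads_alt predecessor assigned_courier loads_int m n
instance (predecessor : List Int) (assigned_courier : List Int) (loads_int : List Int) (m : Int) (n : Int) (out : List Int × List (List Int) × List (List Int)) : Decidable (Spec_get_tours_and_loads predecessor assigned_courier loads_int m n out) := by unfold Spec_get_tours_and_loads; infer_instance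

-- ===== CLAIM (what is proved, stated in full; the proofs are below) =====
def Claim_equal_get_tours_and_loads : Prop := ∀ (predecessor : List Int) (assigned_courier : List Int) (loads_int : List Int) (m : Int) (n : Int), Dom_get_tours_and_loads predecessor assigned_courier loads_int m n → Pre_get_tours_and_loads predecessor assigned_courier loads_int m n → Spec_get_tours_and_loads predecessor assigned_courier loads_int m n (get_tours_and_loads predecessor assigned_courier loads_int m n)

-- ===== LEMMAS AND PROOFS =====

theorem pv_setD_map_pyRange {α : Type} (m a : Int) (h : Int → α) (ha0 : 0 ≤ a) (v : α) :
  PySem.List.pySetD ((PySem.List.pyRange 0 m 1).map h) a v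
    = (PySem.List.pyRange 0 m 1).map (fun c => if c = a then v else h c) := by
  rw [PySem.List.pySetD_of_nonneg _ _ ha0]
  apply List.ext_getElem
  · simp
  intro i h1 h2
  simp only [List.getElem_set, List.getElem_map, PySem.List.getElem_pyRange_one]
  by_cases hc : a.toNat = i
  · rw [if_pos hc, if_pos (by omega)]
  · rw [if_neg hc, if_neg (by omega)]

theorem pv_setD_getD_self {α : Type} (xs : List α) (i : Int) (d : α) (h0 : 0 ≤ i) (h : i < (xs.length : Int)) :
    PySem.List.pySetD xs i (PySem.List.pyGetD xs i d) = xs := by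
  rw [PySem.List.pyGetD_eq_getElem xs d h0 h, PySem.List.pySetD_of_nonneg _ _ h0]
  exact List.set_getElem_self _

theorem pv_getD_setD_self {α : Type} (xs : List α) (i : Int) (v d : α) (h0 : 0 ≤ i) (h : i < (xs.length : Int)) :
    PySem.List.pyGetD (PySem.List.pySetD xs i v) i d = v := by
  rw [PySem.List.pySetD_of_nonneg _ _ h0,
      PySem.List.pyGetD_eq_getElem _ d h0 (by simpa using h)]
  simp

theorem pv_setD_setD {α : Type} (xs : List α) (i : Int) (v w : α) (h0 : 0 ≤ i) :
    PySem.List.pySetD (PySem.List.pySetD xs i v) i w = PySem.List.pySetD xs i w := by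
  rw [PySem.List.pySetD_of_nonneg _ _ h0, PySem.List.pySetD_of_nonneg _ _ h0,
      PySem.List.pySetD_of_nonneg _ _ h0, List.set_set]

def pvPick (p a l : List Int) (n c : Int) (ks : List Int) : List (Int × Int) :=
  ks.filterMap (fun k =>
    if PySem.List.pyGetD a k 0 = c ∧ PySem.List.pyGetD l k 0 ≠ 0 ∧ PySem.List.pyGetD p k 0 < n + 1
    then some (PySem.List.pyGetD p k 0 - 1, PySem.List.pyGetD l k 0) else none)

theorem pv_A_inner (p a l : List Int) (n courier : Int) (hc : 0 ≤ courier) (ks : List Int) :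
  ∀ (vd lc : List (List Int)), courier < (vd.length : Int) → courier < (lc.length : Int) →
    ks.foldl (fun (st2 : List (List Int) × List (List Int)) node =>
        if PySem.List.pyGetD a node 0 = courier + 1 ∧ PySem.List.pyGetD l node 0 ≠ 0 ∧
           PySem.List.pyGetD p node 0 < n + 1 then
          (PySem.List.pySetD st2.1 courier (PySem.List.pyGetD st2.1 courier [] ++ [PySem.List.pyGetD p node 0 - 1]),
           PySem.List.pySetD st2.2 courier (PySem.List.pyGetD st2.2 courier [] ++ [PySem.List.pyGetD l node 0]))
        else st2) (vd, lc)
    = (PySem.List.pySetD vd courier (PySem.List.pyGetD vd courier [] ++ (pvPick p a l n (courier + 1) ks).map Prod.fst),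
       PySem.List.pySetD lc courier (PySem.List.pyGetD lc courier [] ++ (pvPick p a l n (courier + 1) ks).map Prod.snd)) := by
  induction ks with
  | nil =>
    intro vd lc hv hl
    simp [pvPick, pv_setD_getD_self _ _ _ hc hv, pv_setD_getD_self _ _ _ hc hl]
  | cons k ks ih =>
    intro vd lc hv hl
    rw [List.foldl_cons]
    by_cases hcond : PySem.List.pyGetD a k 0 = courier + 1 ∧ PySem.List.pyGetD l k 0 ≠ 0 ∧
        PySem.List.pyGetD p k 0 < n + 1
    · rw [if_pos hcond]
      rw [ih _ _ (by simpa [PySem.List.length_pySetD] using hv) (by simpa [PySem.List.length_pySetD] using hl)]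
      rw [pv_getD_setD_self _ _ _ _ hc hv, pv_getD_setD_self _ _ _ _ hc hl,
          pv_setD_setD _ _ _ _ hc, pv_setD_setD _ _ _ _ hc]
      simp only [pvPick, List.filterMap_cons, if_pos hcond, List.map_cons]
      simp [List.append_assoc]
    · rw [if_neg hcond, ih _ _ hv hl]
      simp only [pvPick, List.filterMap_cons, if_neg hcond]

def pvPairs (p a l : List Int) (n c : Int) : List (Int × Int) :=
  pvPick p a l n c (PySem.List.pyRange 0 (a.length : Int) 1)

theorem pv_A_outer1 (p a l : List Int) (m n : Int) :
  ∀ (cnt : Nat) (aI : Int), 0 ≤ aI → aI ≤ m → cnt = (m - aI).toNat →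
  (PySem.List.pyRange aI m 1).foldl (fun (st : List (List Int) × List (List Int)) courier =>
      (PySem.List.pyRange 0 (a.length : Int) 1).foldl (fun (st2 : List (List Int) × List (List Int)) node =>
        if PySem.List.pyGetD a node 0 = courier + 1 ∧
           PySem.List.pyGetD l node 0 ≠ 0 ∧
           PySem.List.pyGetD p node 0 < n + 1 then
          (PySem.List.pySetD st2.1 courier (PySem.List.pyGetD st2.1 courier [] ++ [PySem.List.pyGetD p node 0 - 1]),
           PySem.List.pySetD st2.2 courier (PySem.List.pyGetD st2.2 courier [] ++ [PySem.List.pyGetD l node 0]))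
        else st2) st)
    ((PySem.List.pyRange 0 m 1).map (fun c => if c < aI then (pvPairs p a l n (c + 1)).map Prod.fst else []),
     (PySem.List.pyRange 0 m 1).map (fun c => if c < aI then (pvPairs p a l n (c + 1)).map Prod.snd else []))
  = ((PySem.List.pyRange 0 m 1).map (fun c => (pvPairs p a l n (c + 1)).map Prod.fst),
     (PySem.List.pyRange 0 m 1).map (fun c => (pvPairs p a l n (c + 1)).map Prod.snd)) := by
  intro cnt
  induction cnt with
  | zero =>
    intro aI h0 h1 h2
    have hm : aI = m := by omega
    subst hm
    rw [PySem.List.pyRange_one_eq_nil le_rfl, List.foldl_nil]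
    refine congrArg₂ Prod.mk ?_ ?_ <;>
    · apply List.map_congr_left
      intro c hcmem
      rw [PySem.List.mem_pyRange_one] at hcmem
      rw [if_pos hcmem.2]
  | succ cnt ih =>
    intro aI h0 h1 h2
    have haim : aI < m := by omega
    rw [PySem.List.pyRange_one_cons haim]
    simp only [List.foldl_cons]
    have hlen1 : aI < (((PySem.List.pyRange 0 m 1).map (fun c => if c < aI then (pvPairs p a l n (c + 1)).map Prod.fst else [])).length : Int) := by
      simp [PySem.List.length_pyRange_one]; omega
    have hlen2 : aI < (((PySem.List.pyRange 0 m 1).map (fun c => if c < aI then (pvPairs p a l n (c + 1)).map Prod.snd else [])).length : Int) := by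
      simp [PySem.List.length_pyRange_one]; omega
    rw [pv_A_inner p a l n aI h0 _ _ _ hlen1 hlen2]
    rw [PySem.List.pyGetD_map_pyRange_of_nonneg _ m aI _ h0 haim,
        PySem.List.pyGetD_map_pyRange_of_nonneg _ m aI _ h0 haim]
    rw [if_neg (by omega), if_neg (by omega)]
    rw [pv_setD_map_pyRange m aI _ h0, pv_setD_map_pyRange m aI _ h0]
    have hstep : ∀ (f : List (Int × Int) → List Int),
        ((PySem.List.pyRange 0 m 1).map (fun c => if c = aI then [] ++ f (pvPick p a l n (aI + 1) (PySem.List.pyRange 0 (a.length : Int) 1)) else if c < aI then f (pvPairs p a l n (c + 1)) else []))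
        = ((PySem.List.pyRange 0 m 1).map (fun c => if c < aI + 1 then f (pvPairs p a l n (c + 1)) else [])) := by
      intro f
      apply List.map_congr_left
      intro c hcmem
      rw [PySem.List.mem_pyRange_one] at hcmem
      by_cases hca : c = aI
      · subst hca
        rw [if_pos rfl, if_pos (by omega)]
        simp [pvPairs]
      · rw [if_neg hca]
        by_cases hlt : c < aI
        · rw [if_pos hlt, if_pos (by omega)]
        · rw [if_neg hlt, if_neg (by omega)]
    rw [hstep (List.map Prod.fst), hstep (List.map Prod.snd)]
    exact ih (aI + 1) (by omega) (by omega) (by omega)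

def pvTour (p a l : List Int) (n c : Int) : List Int :=
  (n + 1) :: ((PySem.List.sorted (pvPairs p a l n (c + 1)) (fun x => x.2) false).map (fun q => q.1 + 1) ++ [n + 1])

def pvLoad (p a l : List Int) (n c : Int) : Int :=
  match PySem.List.max? ((pvPairs p a l n (c + 1)).map Prod.snd) (fun y => y) with
  | some v => v
  | none => 0

theorem pv_A_outer2 (p a l : List Int) (m n : Int) :
  ∀ (cnt : Nat) (aI : Int), 0 ≤ aI → aI ≤ m → cnt = (m - aI).toNat →
  (PySem.List.pyRange aI m 1).foldl (fun (st : List (List Int) × List Int) courier =>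
      (PySem.List.pySetD st.1 courier
        (PySem.List.insert
          ((PySem.List.sorted ((PySem.List.pyGetD ((PySem.List.pyRange 0 m 1).map (fun c => (pvPairs p a l n (c + 1)).map Prod.fst)) courier []).zip
              (PySem.List.pyGetD ((PySem.List.pyRange 0 m 1).map (fun c => (pvPairs p a l n (c + 1)).map Prod.snd)) courier [])) (fun x => x.2) false).map (fun q => q.1 + 1) ++ [n + 1]) 0 (n + 1)),
       st.2 ++ [match PySem.List.max? (PySem.List.pyGetD ((PySem.List.pyRange 0 m 1).map (fun c => (pvPairs p a l n (c + 1)).map Prod.snd)) courier []) (fun y => y) with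
                | some v => v
                | none => 0]))
    ((PySem.List.pyRange 0 m 1).map (fun c => if c < aI then pvTour p a l n c else [0]),
     (PySem.List.pyRange 0 aI 1).map (fun c => pvLoad p a l n c))
  = ((PySem.List.pyRange 0 m 1).map (fun c => pvTour p a l n c),
     (PySem.List.pyRange 0 m 1).map (fun c => pvLoad p a l n c)) := by
  intro cnt
  induction cnt with
  | zero =>
    intro aI h0 h1 h2
    have hm : aI = m := by omega
    subst hm
    rw [PySem.List.pyRange_one_eq_nil le_rfl, List.foldl_nil]
    refine congrArg₂ Prod.mk ?_ rfl
    apply List.map_congr_left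
    intro c hcmem
    rw [PySem.List.mem_pyRange_one] at hcmem
    rw [if_pos hcmem.2]
  | succ cnt ih =>
    intro aI h0 h1 h2
    have haim : aI < m := by omega
    rw [PySem.List.pyRange_one_cons haim]
    simp only [List.foldl_cons]
    rw [PySem.List.pyGetD_map_pyRange_of_nonneg _ m aI _ h0 haim,
        PySem.List.pyGetD_map_pyRange_of_nonneg _ m aI _ h0 haim]
    rw [pv_setD_map_pyRange m aI _ h0]
    rw [List.zip_map']
    have hpairs : (pvPairs p a l n (aI + 1)).map (fun q => (q.1, q.2)) = pvPairs p a l n (aI + 1) := by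
      simp
    rw [hpairs, PySem.List.insert_zero]
    have hstep : ((PySem.List.pyRange 0 m 1).map (fun c =>
        if c = aI then (n + 1) :: ((PySem.List.sorted (pvPairs p a l n (aI + 1)) (fun x => x.2) false).map (fun q => q.1 + 1) ++ [n + 1])
        else if c < aI then pvTour p a l n c else [0]))
      = ((PySem.List.pyRange 0 m 1).map (fun c => if c < aI + 1 then pvTour p a l n c else [0])) := by
      apply List.map_congr_left
      intro c hcmem
      rw [PySem.List.mem_pyRange_one] at hcmem
      by_cases hca : c = aI
      · subst hca
        rw [if_pos rfl, if_pos (by omega)]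
        rfl
      · rw [if_neg hca]
        by_cases hlt : c < aI
        · rw [if_pos hlt, if_pos (by omega)]
        · rw [if_neg hlt, if_neg (by omega)]
    rw [hstep]
    have hld : ((PySem.List.pyRange 0 aI 1).map (fun c => pvLoad p a l n c) ++
        [match PySem.List.max? ((pvPairs p a l n (aI + 1)).map Prod.snd) (fun y => y) with
         | some v => v
         | none => 0])
      = (PySem.List.pyRange 0 (aI + 1) 1).map (fun c => pvLoad p a l n c) := by
      rw [PySem.List.pyRange_one_succ_right h0, List.map_append]
      rfl
    rw [hld]
    exact ih (aI + 1) (by omega) (by omega) (by omega)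

def pvPickB (p a l : List Int) (m n c : Int) (ks : List Int) : List (Int × Int) :=
  ks.filterMap (fun k =>
    if (1 ≤ PySem.List.pyGetD a k 0 ∧ PySem.List.pyGetD a k 0 ≤ m ∧
        PySem.List.pyGetD l k 0 ≠ 0 ∧ PySem.List.pyGetD p k 0 < n + 1) ∧
       PySem.List.pyGetD a k 0 - 1 = c
    then some (PySem.List.pyGetD p k 0 - 1, PySem.List.pyGetD l k 0) else none)

theorem pv_B_buckets (p a l : List Int) (m n : Int) (ks : List Int) :
  ∀ (h : Int → List (Int × Int)),
  ks.foldl (fun (bs : List (List (Int × Int))) k =>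
      if 1 ≤ PySem.List.pyGetD a k 0 ∧ PySem.List.pyGetD a k 0 ≤ m ∧
         PySem.List.pyGetD l k 0 ≠ 0 ∧ PySem.List.pyGetD p k 0 < n + 1 then
        PySem.List.pySetD bs (PySem.List.pyGetD a k 0 - 1)
          (PySem.List.pyGetD bs (PySem.List.pyGetD a k 0 - 1) [] ++
            [(PySem.List.pyGetD p k 0 - 1, PySem.List.pyGetD l k 0)])
      else bs) ((PySem.List.pyRange 0 m 1).map h)
  = (PySem.List.pyRange 0 m 1).map (fun c => h c ++ pvPickB p a l m n c ks) := by
  induction ks with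
  | nil =>
    intro h
    simp [pvPickB]
  | cons k ks ih =>
    intro h
    rw [List.foldl_cons]
    by_cases hg : 1 ≤ PySem.List.pyGetD a k 0 ∧ PySem.List.pyGetD a k 0 ≤ m ∧
        PySem.List.pyGetD l k 0 ≠ 0 ∧ PySem.List.pyGetD p k 0 < n + 1
    · rw [if_pos hg]
      rw [PySem.List.pyGetD_map_pyRange_of_nonneg h m (PySem.List.pyGetD a k 0 - 1) [] (by omega) (by omega)]
      rw [pv_setD_map_pyRange m (PySem.List.pyGetD a k 0 - 1) h (by omega)]
      rw [ih]
      apply List.map_congr_left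
      intro c hcmem
      by_cases hca : c = PySem.List.pyGetD a k 0 - 1
      · rw [if_pos (by omega)]
        simp only [pvPickB, List.filterMap_cons]
        rw [if_pos ⟨hg, by omega⟩]
        subst hca
        simp [List.append_assoc]
      · rw [if_neg (by omega)]
        simp only [pvPickB, List.filterMap_cons]
        rw [if_neg (by intro hcon; exact hca (by omega))]
    · rw [if_neg hg, ih]
      apply List.map_congr_left
      intro c hcmem
      simp only [pvPickB, List.filterMap_cons]
      rw [if_neg (by intro hcon; exact hg hcon.1)]

theorem pv_pickB_eq (p a l : List Int) (m n c : Int) (ks : List Int) (h0 : 0 ≤ c) (h1 : c < m) :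
    pvPickB p a l m n c ks = pvPick p a l n (c + 1) ks := by
  unfold pvPickB pvPick
  apply List.filterMap_congr
  intro k _
  by_cases hc : PySem.List.pyGetD a k 0 = c + 1 ∧ PySem.List.pyGetD l k 0 ≠ 0 ∧
      PySem.List.pyGetD p k 0 < n + 1
  · rw [if_pos hc, if_pos ⟨⟨by omega, by omega, hc.2.1, hc.2.2⟩, by omega⟩]
  · rw [if_neg hc, if_neg]
    intro hcon
    exact hc ⟨by omega, hcon.1.2.2.1, hcon.1.2.2.2⟩

theorem pv_foldl_triple {α : Type} (f : α → Int) (g h : α → List Int) (l : List α) :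
  ∀ (acc : List Int × List (List Int) × List (List Int)),
  l.foldl (fun st x => (st.1 ++ [f x], st.2.1 ++ [g x], st.2.2 ++ [h x])) acc
  = (acc.1 ++ l.map f, acc.2.1 ++ l.map g, acc.2.2 ++ l.map h) := by
  induction l with
  | nil => intro acc; simp
  | cons x xs ih =>
    intro acc
    rw [List.foldl_cons, ih]
    simp

theorem pv_maxv_perm (xs ys : List Int) (hperm : xs.Perm ys) :
    (match PySem.List.max? xs (fun y => y) with | some v => v | none => 0)
    = (match PySem.List.max? ys (fun y => y) with | some v => v | none => 0) := by
  cases hx : PySem.List.max? xs (fun y => y) with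
  | none =>
    have h1 : xs = [] := (PySem.List.max?_eq_none_iff xs _).mp hx
    subst h1
    have h2 : ys = [] := hperm.symm.eq_nil
    subst h2
    rfl
  | some v =>
    cases hy : PySem.List.max? ys (fun y => y) with
    | none =>
      have h2 : ys = [] := (PySem.List.max?_eq_none_iff ys _).mp hy
      subst h2
      have h3 : xs = [] := hperm.eq_nil
      subst h3
      simp [PySem.List.max?] at hx
    | some w =>
      have hvw : v ≤ w := PySem.List.max?_isMax hy v (hperm.mem_iff.mp (PySem.List.max?_mem hx))
      have hwv : w ≤ v := PySem.List.max?_isMax hx w (hperm.mem_iff.mpr (PySem.List.max?_mem hy))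
      simp
      omega

theorem pv_slice_tour (x y : Int) (l : List Int) :
    PySem.List.slice (x :: (l ++ [y])) (some 1) (some (-1)) = l := by
  simp [PySem.List.slice]

theorem pv_init_const {α : Type} (m : Int) (X : Int → α) (e : α) :
    (PySem.List.pyRange 1 (m + 1) 1).map (fun _ => e)
      = (PySem.List.pyRange 0 m 1).map (fun c => if c < 0 then X c else e) := by
  apply List.ext_getElem
  · simp [PySem.List.length_pyRange_one]
  intro i h1 h2
  simp only [List.getElem_map, PySem.List.getElem_pyRange_one]
  rw [if_neg (by omega)]

theorem pv_A_eq (p a l : List Int) (m n : Int) :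
    get_tours_and_loads p a l m n
      = ((PySem.List.pyRange 0 m 1).map (fun c => pvLoad p a l n c),
         (PySem.List.pyRange 0 m 1).map (fun c => pvTour p a l n c),
         (PySem.List.pyRange 0 m 1).map (fun c =>
           (PySem.List.sorted (pvPairs p a l n (c + 1)) (fun x => x.2) false).map (fun q => q.1 + 1))) := by
  by_cases hm : 0 ≤ m
  · simp only [get_tours_and_loads]
    rw [show ((PySem.List.pyRange 1 (m + 1) 1).map (fun _ => ([] : List Int)),
             (PySem.List.pyRange 1 (m + 1) 1).map (fun _ => ([] : List Int)))
          = ((PySem.List.pyRange 0 m 1).map (fun c => if c < (0 : Int) then (pvPairs p a l n (c + 1)).map Prod.fst else []),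
             (PySem.List.pyRange 0 m 1).map (fun c => if c < (0 : Int) then (pvPairs p a l n (c + 1)).map Prod.snd else []))
        from congrArg₂ Prod.mk
          (pv_init_const m (fun c => (pvPairs p a l n (c + 1)).map Prod.fst) [])
          (pv_init_const m (fun c => (pvPairs p a l n (c + 1)).map Prod.snd) [])]
    rw [pv_A_outer1 p a l m n (m - 0).toNat 0 le_rfl hm rfl]
    dsimp only
    rw [show ((PySem.List.pyRange 1 (m + 1) 1).map (fun _ => ([0] : List Int)), ([] : List Int))
          = ((PySem.List.pyRange 0 m 1).map (fun c => if c < (0 : Int) then pvTour p a l n c else [0]),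
             (PySem.List.pyRange 0 0 1).map (fun c => pvLoad p a l n c))
        from congrArg₂ Prod.mk
          (pv_init_const m (fun c => pvTour p a l n c) [0])
          (by rw [PySem.List.pyRange_one_eq_nil le_rfl]; rfl)]
    rw [pv_A_outer2 p a l m n (m - 0).toNat 0 le_rfl hm rfl]
    dsimp only
    rw [PySem.List.foldl_append_singleton_eq_map (fun t => PySem.List.slice t (some 1) (some (-1)))]
    rw [List.nil_append, List.map_map]
    refine congrArg₂ Prod.mk rfl (congrArg₂ Prod.mk rfl ?_)
    apply List.map_congr_left
    intro c _
    show PySem.List.slice (pvTour p a l n c) (some 1) (some (-1)) = _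
    unfold pvTour
    rw [pv_slice_tour]
  · have hm' : m ≤ 0 := by omega
    have hm1 : m + 1 ≤ 1 := by omega
    simp only [get_tours_and_loads]
    rw [PySem.List.pyRange_one_eq_nil hm1, PySem.List.pyRange_one_eq_nil hm']
    simp

theorem pv_B_eq (p a l : List Int) (m n : Int) :
    get_tours_and_loads_alt p a l m n
      = ((PySem.List.pyRange 0 m 1).map (fun c => pvLoad p a l n c),
         (PySem.List.pyRange 0 m 1).map (fun c => pvTour p a l n c),
         (PySem.List.pyRange 0 m 1).map (fun c =>
           (PySem.List.sorted (pvPairs p a l n (c + 1)) (fun x => x.2) false).map (fun q => q.1 + 1))) := by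
  simp only [get_tours_and_loads_alt]
  rw [PySem.List.enumerate_eq_map_pyRange a 0]
  rw [List.foldl_map]
  dsimp only
  rw [pv_B_buckets p a l m n _ (fun _ => [])]
  rw [show ((PySem.List.pyRange 0 m 1).map (fun c => [] ++ pvPickB p a l m n c (PySem.List.pyRange 0 (PySem.List.len a) 1)))
        = ((PySem.List.pyRange 0 m 1).map (fun c => pvPairs p a l n (c + 1)))
      from List.map_congr_left (by
        intro c hcmem
        rw [PySem.List.mem_pyRange_one] at hcmem
        rw [List.nil_append]
        exact pv_pickB_eq p a l m n c _ hcmem.1 hcmem.2)]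
  rw [pv_foldl_triple (α := List (Int × Int))
        (fun pairs0 => match PySem.List.max? ((PySem.List.sorted pairs0 (fun q => q.2) false).map (fun q => q.2)) (fun y => y) with
                       | some v => v
                       | none => 0)
        (fun pairs0 => (n + 1) :: ((PySem.List.sorted pairs0 (fun q => q.2) false).map (fun q => q.1 + 1) ++ [n + 1]))
        (fun pairs0 => (PySem.List.sorted pairs0 (fun q => q.2) false).map (fun q => q.1 + 1))
        ((PySem.List.pyRange 0 m 1).map (fun c => pvPairs p a l n (c + 1))) ([], [], [])]
  dsimp only
  rw [List.nil_append, List.nil_append, List.nil_append, List.map_map, List.map_map, List.map_map]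
  refine congrArg₂ Prod.mk ?_ (congrArg₂ Prod.mk rfl rfl)
  apply List.map_congr_left
  intro c _
  show (match PySem.List.max? ((PySem.List.sorted (pvPairs p a l n (c + 1)) (fun q => q.2) false).map (fun q => q.2)) (fun y => y) with
        | some v => v
        | none => 0) = pvLoad p a l n c
  unfold pvLoad
  exact pv_maxv_perm _ _ ((PySem.List.sorted_perm (pvPairs p a l n (c + 1)) (fun q => q.2) false).map (fun q => q.2))

-- ===== VERDICT (by name: the statement is the Claim_ definition above) =====
theorem get_tours_and_loads_spec : Claim_equal_get_tours_and_loads := by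
  intro predecessor assigned_courier loads_int m n _ _
  unfold Spec_get_tours_and_loads
  rw [pv_A_eq, pv_B_eq]
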